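-- pv_equiv track=rewrite | github.com/gwendal-margely/riscv | outoforder.py | reorder_logic
-- ===== SOURCE A (Python) =====
-- def reorder_logic(instructions):
--
--     dependencies = {}
--     independent_instructions = []
--
--     for i, inst in enumerate(instructions):
--         opcode = inst & 0x7F
--         if opcode in [0b0000011, 0b0100011, 0b1100011, 0b1100111, 0b1101111, 0b0110111, 0b0010111, 0b0010011, 0b0110011, 0b1110011]:
--             # Instructions dépendantes
--             dependencies[i] = []
--         else:
--             # Instructions indépendantes
--             independent_instructions.append(i)
--
--     reordered_instructions = [instructions[i] for i in independent_instructions]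
--
--     while dependencies:
--         for i, deps in list(dependencies.items()):
--             if all(dep in reordered_instructions for dep in deps):
--                 reordered_instructions.append(instructions[i])
--                 del dependencies[i]
--
--     return reordered_instructions
-- ===== SOURCE B (Python) =====
-- def reorder_logic(instructions):
--     dep_ops = {0b0000011, 0b0100011, 0b1100011, 0b1100111, 0b1101111,
--                0b0110111, 0b0010111, 0b0010011, 0b0110011, 0b1110011}
--     independent = [x for x in instructions if x & 0x7F not in dep_ops]
--     dependent = [x for x in instructions if x & 0x7F in dep_ops]
--     return independent + dependent
-- ===== Notes on version B (the rewrite author's own statement) =====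
-- stated objective: simpler
-- what changed: Replaces the index dict, the index lists and the dead dependency-resolution while-loop with two direct value filters over the instruction list, concatenated (independent first, then dependent); A's dependency lists are always empty, so its while-loop is one trivial pass in index order.
import Mathlib
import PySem

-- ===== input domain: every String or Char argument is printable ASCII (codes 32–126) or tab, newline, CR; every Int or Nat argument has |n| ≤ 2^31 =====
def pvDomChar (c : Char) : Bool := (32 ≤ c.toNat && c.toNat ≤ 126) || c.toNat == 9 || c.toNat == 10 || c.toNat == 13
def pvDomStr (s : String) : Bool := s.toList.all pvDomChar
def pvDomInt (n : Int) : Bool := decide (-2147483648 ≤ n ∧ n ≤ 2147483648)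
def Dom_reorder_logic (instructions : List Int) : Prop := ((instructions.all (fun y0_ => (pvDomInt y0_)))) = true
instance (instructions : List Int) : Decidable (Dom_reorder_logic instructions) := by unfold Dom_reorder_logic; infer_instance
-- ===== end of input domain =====

-- B replaces A's index dict and dead dependency-resolution while-loop with two direct value
-- filters concatenated (objective: simpler); return values proved equal on all inputs.

-- ===== PORT A =====
-- the opcode list A tests membership in
def depOpsA : List Int :=
  [0b0000011, 0b0100011, 0b1100011, 0b1100111, 0b1101111, 0b0110111, 0b0010111, 0b0010011, 0b0110011, 0b1110011]

-- one pass of the for-loop inside `while dependencies:` — folds over the snapshot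
-- list(dependencies.items()) mutating the live state (dict, reordered_instructions).
-- instructions[i] is ported as pyGetD … 0: every index stored in the dict is in range, so the
-- default is never returned.
def pvPassA (instructions : List Int) (snapshot : List (Int × List Int))
    (st : PySem.Dict Int (List Int) × List Int) : PySem.Dict Int (List Int) × List Int :=
  snapshot.foldl
    (fun st p =>
      if p.2.all (fun dep => st.2.contains dep) then
        (st.1.erase p.1, st.2 ++ [PySem.List.pyGetD instructions p.1 0])
      else st)
    st

-- `while dependencies:` with fuel; every dependency list A stores is [], so one pass empties the
-- dict and fuel size+1 is never exhausted (the 0-branch is unreachable).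
def pvWhileA (instructions : List Int) : Nat → PySem.Dict Int (List Int) → List Int → List Int
  | 0, _, r => r
  | f + 1, d, r =>
    if d.items.isEmpty then r
    else
      let st := pvPassA instructions d.items (d, r)
      pvWhileA instructions f st.1 st.2

def reorder_logic (instructions : List Int) : List Int :=
  let st := (PySem.List.enumerate instructions).foldl
    (fun (st : PySem.Dict Int (List Int) × List Int) p =>
      if depOpsA.contains (PySem.Int.band p.2 0x7F) then (st.1.insert p.1 [], st.2)
      else (st.1, st.2 ++ [p.1]))
    (PySem.Dict.empty, [])
  let reordered := st.2.map (fun i => PySem.List.pyGetD instructions i 0)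
  pvWhileA instructions (st.1.size + 1) st.1 reordered

-- ===== PORT B =====
-- the dep_ops set literal of Source B
def depOpsB : PySem.Set Int :=
  PySem.Set.ofList
    [0b0000011, 0b0100011, 0b1100011, 0b1100111, 0b1101111, 0b0110111, 0b0010111, 0b0010011, 0b0110011, 0b1110011]

def reorder_logic_alt (instructions : List Int) : List Int :=
  let independent := instructions.filter (fun x => !(depOpsB.contains (PySem.Int.band x 0x7F)))
  let dependent := instructions.filter (fun x => depOpsB.contains (PySem.Int.band x 0x7F))
  independent ++ dependent

-- ===== PRECONDITION & SPEC =====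
def Spec_reorder_logic (instructions : List Int) (out : List Int) : Prop := out = reorder_logic_alt instructions
instance (instructions : List Int) (out : List Int) : Decidable (Spec_reorder_logic instructions out) := by unfold Spec_reorder_logic; infer_instance

-- ===== CLAIM (what is proved, stated in full; the proofs are below) =====
def Claim_equal_reorder_logic : Prop := ∀ (instructions : List Int), Dom_reorder_logic instructions → Spec_reorder_logic instructions (reorder_logic instructions)

-- ===== LEMMAS AND PROOFS =====

-- the membership test A performs, as a predicate on an instruction value
def pvDepA (x : Int) : Bool := depOpsA.contains (PySem.Int.band x 0x7F)

-- A's first loop: the dict collects (index, []) for dependent instructions in index order, the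
-- list collects the independent indices in order.
lemma pv_foldA (l : List Int) : ∀ (s : Int) (d : PySem.Dict Int (List Int)) (acc : List Int),
    (∀ k ∈ d.keys, k < s) →
    ((PySem.List.enumerate l s).foldl
      (fun (st : PySem.Dict Int (List Int) × List Int) p =>
        if depOpsA.contains (PySem.Int.band p.2 0x7F) then (st.1.insert p.1 [], st.2)
        else (st.1, st.2 ++ [p.1])) (d, acc)).1.items
        = d.items ++ ((PySem.List.enumerate l s).filter (fun p => pvDepA p.2)).map
            (fun p => (p.1, ([] : List Int)))
    ∧ ((PySem.List.enumerate l s).foldl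
      (fun (st : PySem.Dict Int (List Int) × List Int) p =>
        if depOpsA.contains (PySem.Int.band p.2 0x7F) then (st.1.insert p.1 [], st.2)
        else (st.1, st.2 ++ [p.1])) (d, acc)).2
        = acc ++ ((PySem.List.enumerate l s).filter (fun p => !pvDepA p.2)).map (·.1) := by
  induction l with
  | nil => intro s d acc h; simp [PySem.List.enumerate]
  | cons x xs ih =>
    intro s d acc h
    rw [PySem.List.enumerate_cons]
    by_cases hc : pvDepA x
    · have hnot : d.contains s = false := by
        by_contra hx
        have := (PySem.Dict.contains_iff_mem_keys d s).mp (by revert hx; cases hdc : d.contains s <;> simp)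
        exact absurd (h s this) (by omega)
      have hk : ∀ k ∈ (d.insert s ([] : List Int)).keys, k < s + 1 := by
        intro k hkm
        rcases (PySem.Dict.mem_keys_insert d s k ([] : List Int)).mp hkm with h1 | h1
        · omega
        · have := h k h1; omega
      have := ih (s+1) (d.insert s []) acc hk
      have hm : PySem.Int.band x 0x7F ∈ depOpsA := by simpa [pvDepA] using hc
      simp only [List.foldl_cons, pvDepA] at hc ⊢
      rw [if_pos hc]
      refine ⟨?_, ?_⟩
      · rw [this.1, PySem.Dict.items_insert_of_not_contains d _ hnot]
        simp [pvDepA, hm]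
      · rw [this.2]; simp [pvDepA, hm]
    · have hk : ∀ k ∈ d.keys, k < s + 1 := fun k hkm => by have := h k hkm; omega
      have := ih (s+1) d (acc ++ [s]) hk
      have hm : PySem.Int.band x 0x7F ∉ depOpsA := by simpa [pvDepA] using hc
      simp only [List.foldl_cons, pvDepA] at hc ⊢
      rw [if_neg (by simpa using hc)]
      refine ⟨?_, ?_⟩
      · rw [this.1]; simp [pvDepA, hm]
      · rw [this.2]; simp [pvDepA, hm]

-- the while-body pass on a dict all of whose values are []: it appends instructions[i] for every
-- key in order and erases every processed key.
lemma pv_pass (instructions : List Int) : ∀ (L : List (Int × List Int))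
    (d : PySem.Dict Int (List Int)) (r : List Int),
    (∀ p ∈ L, p.2 = ([] : List Int)) →
    pvPassA instructions L (d, r)
      = (⟨d.items.filter (fun q => !((L.map (·.1)).contains q.1))⟩,
         r ++ L.map (fun p => PySem.List.pyGetD instructions p.1 0)) := by
  intro L
  induction L with
  | nil => intro d r _; simp [pvPassA]
  | cons q L ih =>
    intro d r h
    have hq : q.2 = ([] : List Int) := h q (by simp)
    simp only [pvPassA, List.foldl_cons, hq, List.all_nil, if_true]
    have := ih (d.erase q.1) (r ++ [PySem.List.pyGetD instructions q.1 0]) (fun p hp => h p (by simp [hp]))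
    simp only [pvPassA] at this
    rw [this]
    refine Prod.ext ?_ (by simp)
    show (_ : PySem.Dict Int (List Int)) = _
    apply PySem.Dict.ext
    show ((PySem.Dict.erase d q.1).items).filter _ = _
    simp only [PySem.Dict.erase, List.filter_filter]
    apply List.filter_congr
    intro p _
    simp only [List.map_cons, List.contains_cons]
    cases hbe : (p.1 == q.1) <;> simp_all

-- indices coming from enumerate l 0 look up their own element
lemma pv_map_get (l : List Int) (f : Int → Bool) :
    ((PySem.List.enumerate l 0).filter (fun p => f p.2)).map
        (fun p => PySem.List.pyGetD l p.1 0)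
      = l.filter f := by
  have hcong : ((PySem.List.enumerate l 0).filter (fun p => f p.2)).map
      (fun p => PySem.List.pyGetD l p.1 0)
    = ((PySem.List.enumerate l 0).filter (fun p => f p.2)).map (fun p => p.2) := by
    apply List.map_congr_left
    intro p hp
    rcases (PySem.List.mem_enumerate_iff l 0 p).mp (List.mem_of_mem_filter hp) with ⟨k, hk, rfl⟩
    simp only [zero_add]
    rw [PySem.List.pyGetD_eq_getElem l 0 (by omega) (by simpa using hk)]
    simp
  rw [hcong]
  have := @List.filter_map (Int × Int) Int (fun p => p.2) f (PySem.List.enumerate l 0)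
  rw [PySem.List.map_snd_enumerate] at this
  exact this.symm

theorem pv_main (instructions : List Int) :
    reorder_logic instructions = reorder_logic_alt instructions := by
  have hfold := pv_foldA instructions 0 PySem.Dict.empty [] (by simp [PySem.Dict.keys_empty])
  have hlist : (depOpsB : List Int) = depOpsA := by decide
  have haltdep : instructions.filter (fun x => depOpsB.contains (PySem.Int.band x 0x7F))
      = instructions.filter pvDepA := by
    apply List.filter_congr; intro x _; simp [pvDepA, PySem.Set.contains, hlist]
  have haltind : instructions.filter (fun x => !(depOpsB.contains (PySem.Int.band x 0x7F)))
      = instructions.filter (fun x => !pvDepA x) := by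
    apply List.filter_congr; intro x _; simp [pvDepA, PySem.Set.contains, hlist]
  unfold reorder_logic reorder_logic_alt
  rw [haltdep, haltind]
  set E := PySem.List.enumerate instructions with hE
  set st := E.foldl
    (fun (st : PySem.Dict Int (List Int) × List Int) p =>
      if depOpsA.contains (PySem.Int.band p.2 0x7F) then (st.1.insert p.1 [], st.2)
      else (st.1, st.2 ++ [p.1])) (PySem.Dict.empty, []) with hst
  simp only [PySem.Dict.empty, List.nil_append] at hfold
  have hind : st.2.map (fun i => PySem.List.pyGetD instructions i 0)
      = instructions.filter (fun x => !pvDepA x) := by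
    rw [hfold.2, List.map_map]
    exact pv_map_get instructions (fun x => !pvDepA x)
  have hdepmap : (st.1.items).map (fun p => PySem.List.pyGetD instructions p.1 0)
      = instructions.filter pvDepA := by
    rw [hfold.1, List.map_map]
    exact pv_map_get instructions pvDepA
  have hvals : ∀ p ∈ st.1.items, p.2 = ([] : List Int) := by
    rw [hfold.1]; intro p hp
    rcases List.mem_map.mp hp with ⟨q, _, rfl⟩; rfl
  show pvWhileA instructions (st.1.size + 1) st.1
      (st.2.map (fun i => PySem.List.pyGetD instructions i 0))
    = instructions.filter (fun x => !pvDepA x) ++ instructions.filter pvDepA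
  rcases hni : st.1.items with _ | ⟨a, as⟩
  · have hdep : instructions.filter pvDepA = [] := by rw [← hdepmap, hni]; rfl
    simp [hni, pvWhileA, hdep, hind]
  · have hsz : st.1.size = as.length + 1 := by simp [PySem.Dict.size, hni]
    rw [hsz]
    have hpass := pv_pass instructions st.1.items st.1
      (st.2.map (fun i => PySem.List.pyGetD instructions i 0)) hvals
    rw [pvWhileA, if_neg (by simp [hni])]
    simp only [hpass]
    rw [pvWhileA, if_pos (by simp; exact fun a b hab => ⟨b, hab⟩), hind, hdepmap]

-- ===== VERDICT (by name: the statement is the Claim_ definition above) =====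
theorem reorder_logic_spec : Claim_equal_reorder_logic := by
  intro instructions _
  show _ = _
  exact pv_main instructions
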